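-- pv_equiv track=rewrite | github.com/JwahoonKim/PS | 프로그래머스/Python/기둥과 보 설치.py | canConstructBeam
-- ===== SOURCE A (Python) =====
-- def canConstructBeam(build_Info, result):
--     x, y = build_Info[0], build_Info[1]
--     count = 0
--     for structure in result:
--         strX, strY = structure[0], structure[1]
--         type = structure[2]
--     # 1. 보의 양끝 중 한 곳에 기둥이 있는 경우
--         if type == 0:
--             if strX == x and strY == y - 1:
--                 return True
--             elif strX == x + 1 and strY == y - 1:
--                 return True
--     # 2. 보의 양 끝이 둘 다 보로 이어지는 경우
--         elif type == 1:
--             if strX == x - 1 and strY == y: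
--                 count += 1
--             elif strX == x + 1 and strY == y:
--                 count += 1
--     if count == 2:
--         return True
--     return False
-- ===== SOURCE B (Python) =====
-- def canConstructBeam(build_Info, result):
--     x, y = build_Info[0], build_Info[1]
--
--     def hits(tx, ty, tt):
--         return sum(s[0] == tx and s[1] == ty and s[2] == tt for s in result)
--
--     return (hits(x, y - 1, 0) > 0
--             or hits(x + 1, y - 1, 0) > 0
--             or hits(x - 1, y, 1) + hits(x + 1, y, 1) == 2)
-- ===== Notes on version B (the rewrite author's own statement) =====
-- stated objective: simpler
-- what changed: Loop interchange: instead of A's single branching pass with an early return and a running counter, B iterates over the four candidate positions and counts each with a uniform targeted scan (helper hits), then combines the four counts in one boolean expression.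
import Mathlib
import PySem

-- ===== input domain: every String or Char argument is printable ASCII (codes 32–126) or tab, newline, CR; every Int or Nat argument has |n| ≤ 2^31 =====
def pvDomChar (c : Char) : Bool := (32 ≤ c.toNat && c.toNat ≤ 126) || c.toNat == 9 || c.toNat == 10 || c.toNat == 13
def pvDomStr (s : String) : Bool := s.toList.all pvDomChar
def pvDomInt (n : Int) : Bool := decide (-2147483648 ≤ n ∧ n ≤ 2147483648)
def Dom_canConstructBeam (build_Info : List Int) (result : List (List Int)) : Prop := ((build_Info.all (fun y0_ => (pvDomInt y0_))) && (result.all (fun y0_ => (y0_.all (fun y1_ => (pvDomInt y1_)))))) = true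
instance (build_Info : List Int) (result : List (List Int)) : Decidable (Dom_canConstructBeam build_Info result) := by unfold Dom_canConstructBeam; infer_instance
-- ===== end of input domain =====

-- B inverts A's loop structure: instead of one branching scan with early return and a running
-- counter, it makes four uniform targeted counts (one per candidate position) and combines them.

-- ===== PORT A =====
-- the for-loop of A: early return True on a matching pillar, else accumulate count; at the end count == 2
def canConstructBeamLoop (x y : Int) (result : List (List Int)) (count : Int) : Bool :=
  match result with
  | [] => count == 2
  | structure_ :: rest =>
    let strX := (PySem.List.pyGet? structure_ 0).getD 0
    let strY := (PySem.List.pyGet? structure_ 1).getD 0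
    let type_ := (PySem.List.pyGet? structure_ 2).getD 0
    if type_ == 0 then
      if strX == x && strY == y - 1 then true
      else if strX == x + 1 && strY == y - 1 then true
      else canConstructBeamLoop x y rest count
    else if type_ == 1 then
      if strX == x - 1 && strY == y then canConstructBeamLoop x y rest (count + 1)
      else if strX == x + 1 && strY == y then canConstructBeamLoop x y rest (count + 1)
      else canConstructBeamLoop x y rest count
    else canConstructBeamLoop x y rest count

def canConstructBeam (build_Info : List Int) (result : List (List Int)) : Bool :=
  let x := (PySem.List.pyGet? build_Info 0).getD 0
  let y := (PySem.List.pyGet? build_Info 1).getD 0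
  canConstructBeamLoop x y result 0

-- ===== PORT B =====
-- hits(tx, ty, tt) = sum(s[0] == tx and s[1] == ty and s[2] == tt for s in result)
def canConstructBeamHits (result : List (List Int)) (tx ty tt : Int) : Int :=
  result.foldl (fun n s =>
    n + (if (PySem.List.pyGet? s 0).getD 0 == tx && (PySem.List.pyGet? s 1).getD 0 == ty
            && (PySem.List.pyGet? s 2).getD 0 == tt then 1 else 0)) 0

def canConstructBeam_alt (build_Info : List Int) (result : List (List Int)) : Bool :=
  let x := (PySem.List.pyGet? build_Info 0).getD 0
  let y := (PySem.List.pyGet? build_Info 1).getD 0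
  (canConstructBeamHits result x (y - 1) 0 > 0)
    || (canConstructBeamHits result (x + 1) (y - 1) 0 > 0)
    || (canConstructBeamHits result (x - 1) y 1 + canConstructBeamHits result (x + 1) y 1 == 2)

-- ===== PRECONDITION & SPEC =====
-- Pre_ excludes exactly the inputs where Python A raises IndexError: build_Info shorter than 2,
-- or some structure shorter than 3.
def Pre_canConstructBeam (build_Info : List Int) (result : List (List Int)) : Prop :=
  2 ≤ build_Info.length ∧ ∀ s ∈ result, 3 ≤ s.length
instance (build_Info : List Int) (result : List (List Int)) : Decidable (Pre_canConstructBeam build_Info result) := by unfold Pre_canConstructBeam; infer_instance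

def pvWitness_canConstructBeam : List Int × List (List Int) := ([2, 3], [[2, 2, 0], [1, 3, 1], [3, 3, 1]])

def Spec_canConstructBeam (build_Info : List Int) (result : List (List Int)) (out : Bool) : Prop := out = canConstructBeam_alt build_Info result
instance (build_Info : List Int) (result : List (List Int)) (out : Bool) : Decidable (Spec_canConstructBeam build_Info result out) := by unfold Spec_canConstructBeam; infer_instance

-- ===== CLAIM (what is proved, stated in full; the proofs are below) =====
def Claim_equal_canConstructBeam : Prop := ∀ (build_Info : List Int) (result : List (List Int)), Dom_canConstructBeam build_Info result → Pre_canConstructBeam build_Info result → Spec_canConstructBeam build_Info result (canConstructBeam build_Info result)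

-- ===== LEMMAS AND PROOFS =====

-- the triple of a structure; both sides are characterised by counts of these triples
def canConstructBeamKey (s : List Int) : Int × Int × Int :=
  ((PySem.List.pyGet? s 0).getD 0, (PySem.List.pyGet? s 1).getD 0, (PySem.List.pyGet? s 2).getD 0)

-- loop characterisation: A's loop returns true iff a matching pillar occurs anywhere, or,
-- absent a pillar, the accumulated count plus the number of matching beams equals 2.
theorem canConstructBeamLoop_char (x y : Int) (result : List (List Int)) (count : Int) :
    canConstructBeamLoop x y result count =
      (result.any (fun s => canConstructBeamKey s == (x, y - 1, 0) || canConstructBeamKey s == (x + 1, y - 1, 0)) ||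
       (count + ((result.map canConstructBeamKey).count (x - 1, y, 1) : Int)
              + ((result.map canConstructBeamKey).count (x + 1, y, 1) : Int) == 2)) := by
  induction result generalizing count with
  | nil => simp [canConstructBeamLoop]
  | cons s rest ih =>
    simp only [canConstructBeamLoop, List.any_cons, List.map_cons, List.count_cons,
      show canConstructBeamKey s = ((PySem.List.pyGet? s 0).getD 0,
        (PySem.List.pyGet? s 1).getD 0, (PySem.List.pyGet? s 2).getD 0) from rfl]
    generalize (PySem.List.pyGet? s 0).getD 0 = a
    generalize (PySem.List.pyGet? s 1).getD 0 = b
    generalize (PySem.List.pyGet? s 2).getD 0 = t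
    by_cases ht0 : t = 0
    · subst ht0
      by_cases hp1 : a = x ∧ b = y - 1
      · simp [hp1.1, hp1.2, Prod.ext_iff]
      · by_cases hp2 : a = x + 1 ∧ b = y - 1
        · simp [hp2.1, hp2.2, Prod.ext_iff]
        · rw [Decidable.not_and_iff_or_not] at hp1 hp2
          have e1 : ((a, b, (0:Int)) == ((x:Int), y - 1, 0)) = false := by
            rcases hp1 with h | h <;> simp [Prod.ext_iff, h]
          have e2 : ((a, b, (0:Int)) == ((x:Int) + 1, y - 1, 0)) = false := by
            rcases hp2 with h | h <;> simp [Prod.ext_iff, h]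
          have e3 : ((a, b, (0:Int)) == ((x:Int) - 1, y, 1)) = false := by
            simp [Prod.ext_iff]
          have e4 : ((a, b, (0:Int)) == ((x:Int) + 1, y, 1)) = false := by
            simp [Prod.ext_iff]
          rcases hp1 with h | h <;> rcases hp2 with h' | h' <;>
            simp [ih, e1, e2, e3, e4, h, h']
    · by_cases ht1 : t = 1
      · subst ht1
        by_cases hc1 : a = x - 1 ∧ b = y
        · have h1 : ((a, b, (1:Int)) == ((x:Int) - 1, y, 1)) = true := by
            simp [hc1.1, hc1.2]
          have h2 : ((a, b, (1:Int)) == ((x:Int) + 1, y, 1)) = false := by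
            simp [Prod.ext_iff]; intro h; omega
          simp [ih, hc1.1, hc1.2]
          rw [show (((x:Int) - 1, y, (1:Int)) == ((x:Int), y - 1, 0)) = false from by simp [Prod.ext_iff],
            show (((x:Int) - 1, y, (1:Int)) == ((x:Int) + 1, y - 1, 0)) = false from by simp [Prod.ext_iff]]
          simp only [Bool.false_or]
          congr 1
          congr 1
          omega
        · by_cases hc2 : a = x + 1 ∧ b = y
          · have h1 : ((a, b, (1:Int)) == ((x:Int) - 1, y, 1)) = false := by
              simp [Prod.ext_iff]; intro h; omega
            have h2 : ((a, b, (1:Int)) == ((x:Int) + 1, y, 1)) = true := by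
              simp [hc2.1, hc2.2]
            simp [ih, hc2.1, hc2.2, show ¬ ((x:Int) + 1 = x - 1) from by omega]
            rw [show (((x:Int) + 1, y, (1:Int)) == ((x:Int), y - 1, 0)) = false from by simp [Prod.ext_iff],
              show (((x:Int) + 1, y, (1:Int)) == ((x:Int) + 1, y - 1, 0)) = false from by simp [Prod.ext_iff]]
            simp only [Bool.false_or]
            congr 1
            congr 1
            omega
          · rw [Decidable.not_and_iff_or_not] at hc1 hc2
            have e1 : ((a, b, (1:Int)) == ((x:Int), y - 1, 0)) = false := by
              simp [Prod.ext_iff]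
            have e2 : ((a, b, (1:Int)) == ((x:Int) + 1, y - 1, 0)) = false := by
              simp [Prod.ext_iff]
            have e3 : ((a, b, (1:Int)) == ((x:Int) - 1, y, 1)) = false := by
              rcases hc1 with h | h <;> simp [Prod.ext_iff, h]
            have e4 : ((a, b, (1:Int)) == ((x:Int) + 1, y, 1)) = false := by
              rcases hc2 with h | h <;> simp [Prod.ext_iff, h]
            simp [ih, e1, e2, e3, e4]
            rw [if_neg (by tauto), if_neg (by tauto)]
      · have e1 : ((a, b, t) == ((x:Int), y - 1, 0)) = false := by
          simp [Prod.ext_iff, ht0]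
        have e2 : ((a, b, t) == ((x:Int) + 1, y - 1, 0)) = false := by
          simp [Prod.ext_iff, ht0]
        have e3 : ((a, b, t) == ((x:Int) - 1, y, 1)) = false := by
          simp [Prod.ext_iff, ht1]
        have e4 : ((a, b, t) == ((x:Int) + 1, y, 1)) = false := by
          simp [Prod.ext_iff, ht1]
        simp [ih, e1, e2, e3, e4, ht0, ht1]

-- B's targeted scan counts exactly the occurrences of the target triple
theorem canConstructBeamHits_count (result : List (List Int)) (tx ty tt : Int) :
    canConstructBeamHits result tx ty tt = ((result.map canConstructBeamKey).count (tx, ty, tt) : Int) := by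
  unfold canConstructBeamHits
  have gen : ∀ (n : Int), result.foldl (fun n s =>
      n + (if (PySem.List.pyGet? s 0).getD 0 == tx && (PySem.List.pyGet? s 1).getD 0 == ty
              && (PySem.List.pyGet? s 2).getD 0 == tt then 1 else 0)) n
      = n + ((result.map canConstructBeamKey).count (tx, ty, tt) : Int) := by
    induction result with
    | nil => simp
    | cons s rest ih =>
      intro n
      have hcond : ((PySem.List.pyGet? s 0).getD 0 == tx && (PySem.List.pyGet? s 1).getD 0 == ty
          && (PySem.List.pyGet? s 2).getD 0 == tt) = (canConstructBeamKey s == (tx, ty, tt)) := by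
        rw [Bool.eq_iff_iff]
        simp [canConstructBeamKey, Prod.ext_iff, and_assoc]
      simp only [List.foldl_cons, List.map_cons, List.count_cons, ih, hcond]
      by_cases h : canConstructBeamKey s = (tx, ty, tt)
      · simp [h]; push_cast; ring
      · simp [h]
  simpa using gen 0

-- ===== VERDICT (by name: the statement is the Claim_ definition above) =====
theorem canConstructBeam_spec : Claim_equal_canConstructBeam := by
  intro bi result _ _
  unfold Spec_canConstructBeam canConstructBeam canConstructBeam_alt
  simp only [canConstructBeamLoop_char, canConstructBeamHits_count]
  set x := (PySem.List.pyGet? bi 0).getD 0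
  set y := (PySem.List.pyGet? bi 1).getD 0
  have hpos : ∀ k : Int × Int × Int,
      (decide ((0:Int) < ((result.map canConstructBeamKey).count k : Int)) = true) ↔
        ∃ s ∈ result, canConstructBeamKey s = k := by
    intro k
    rw [decide_eq_true_iff]
    constructor
    · intro h
      have h' : 0 < (result.map canConstructBeamKey).count k := by exact_mod_cast h
      obtain ⟨s, hs, hk⟩ := List.mem_map.mp (List.count_pos_iff.mp h')
      exact ⟨s, hs, hk⟩
    · rintro ⟨s, hs, rfl⟩
      exact_mod_cast List.count_pos_iff.mpr (List.mem_map.mpr ⟨s, hs, rfl⟩)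
  have hany : (result.any fun s => canConstructBeamKey s == (x, y - 1, 0) ||
      canConstructBeamKey s == (x + 1, y - 1, 0))
      = (decide ((0:Int) < ((result.map canConstructBeamKey).count (x, y - 1, 0) : Int)) ||
         decide ((0:Int) < ((result.map canConstructBeamKey).count (x + 1, y - 1, 0) : Int))) := by
    rw [Bool.eq_iff_iff]
    simp only [List.any_eq_true, Bool.or_eq_true, beq_iff_eq, hpos]
    constructor
    · rintro ⟨s, hs, h | h⟩
      · exact Or.inl ⟨s, hs, h⟩
      · exact Or.inr ⟨s, hs, h⟩
    · rintro (⟨s, hs, h⟩ | ⟨s, hs, h⟩)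
      · exact ⟨s, hs, Or.inl h⟩
      · exact ⟨s, hs, Or.inr h⟩
  simp only [gt_iff_lt]
  rw [hany]
  simp [Bool.or_assoc]
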